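-- pv_equiv track=rewrite | github.com/pyfca/pyfca | pyfca/implications.py | B
-- ===== SOURCE A (Python) =====
-- Awidth = lambda n: 2**n
--
-- def A(g,i):
--     """recursively constructs A line for g; i = len(g)-1"""
--     g1 = g&(2**i)
--     if i:
--         n = Awidth(i)
--         An = A(g,i-1)
--         if g1:
--             return An<<n | An
--         else:
--             return int('1'*n,2)<<n | An
--     else:
--         if g1:
--             return int('00',2)
--         else:
--             return int('10',2)
--
-- Bwidth = lambda n:n*2**(n-1)
--
-- def B(g,i):
--     """recursively constructs B line for g; i = len(g)-1"""
--     g1 = g&(2**i)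
--     if i:
--         nA = Awidth(i)
--         nB = Bwidth(i)
--         i=i-1
--         Bn = B(g,i)
--         if g1:
--             return Bn            << (nA+nB) | int('1'*nA,2) << nB | Bn
--         else:
--             return int('1'*nB,2) << (nA+nB) | A(g,i)      << nB | Bn
--     else:
--         if g1:
--             return 1
--         else:
--             return 0
-- ===== SOURCE B (Python) =====
-- def B(g, i):
--     """iteratively constructs B line for g bottom-up; i = len(g)-1"""
--     a = 0 if g & 1 else 2
--     b = 1 if g & 1 else 0
--     for level in range(1, i + 1):
--         nA = 1 << level
--         nB = level << (level - 1)
--         gbit = g & (1 << level)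
--         if gbit:
--             b = b << (nA + nB) | ((1 << nA) - 1) << nB | b
--         else:
--             b = ((1 << nB) - 1) << (nA + nB) | a << nB | b
--         if gbit:
--             a = a << nA | a
--         else:
--             a = ((1 << nA) - 1) << nA | a
--     return b
-- ===== Notes on version B (the rewrite author's own statement) =====
-- stated objective: alternative
-- what changed: Replaced the two mutually recursive functions A and B by a single iterative bottom-up loop that carries the (A-line, B-line) pair from level 0 up to i, so A is never separately recursed.
import Mathlib
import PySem

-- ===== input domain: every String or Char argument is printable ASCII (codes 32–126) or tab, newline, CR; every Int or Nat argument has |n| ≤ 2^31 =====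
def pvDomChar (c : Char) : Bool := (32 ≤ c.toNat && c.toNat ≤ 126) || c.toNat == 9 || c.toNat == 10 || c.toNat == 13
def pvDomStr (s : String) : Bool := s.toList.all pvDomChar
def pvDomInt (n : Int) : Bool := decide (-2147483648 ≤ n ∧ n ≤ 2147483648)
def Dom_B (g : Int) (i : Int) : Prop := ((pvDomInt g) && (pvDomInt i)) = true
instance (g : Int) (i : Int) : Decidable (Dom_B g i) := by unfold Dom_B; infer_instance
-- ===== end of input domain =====

-- B replaces the two mutually recursive functions by one iterative bottom-up loop carrying
-- the (A-line, B-line) pair; objective: alternative decomposition, same exact values.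

-- ===== PORT A =====
-- port of helper A (recursion on the Nat image of i; Python raises for i < 0, excluded by Pre_)
def pvA (g : Int) : Nat → Int
  | 0 =>
      if PySem.Int.band g 1 ≠ 0 then 0 else 2   -- int('00',2) / int('10',2)
  | k + 1 =>
      let n : Nat := 2 ^ (k + 1)                 -- Awidth(i)
      let An := pvA g k
      if PySem.Int.band g ((2 : Int) ^ (k + 1)) ≠ 0 then
        PySem.Int.bor (An <<< n) An
      else
        PySem.Int.bor (((2 : Int) ^ n - 1) <<< n) An   -- int('1'*n,2) = 2^n - 1

-- port of B's body (g1 = g & 2**i; base 1 / 0)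
def pvBrec (g : Int) : Nat → Int
  | 0 =>
      if PySem.Int.band g 1 ≠ 0 then 1 else 0
  | k + 1 =>
      let nA : Nat := 2 ^ (k + 1)                -- Awidth(i)
      let nB : Nat := (k + 1) * 2 ^ k            -- Bwidth(i) = i*2**(i-1)
      let Bn := pvBrec g k
      if PySem.Int.band g ((2 : Int) ^ (k + 1)) ≠ 0 then
        PySem.Int.bor (PySem.Int.bor (Bn <<< (nA + nB)) (((2 : Int) ^ nA - 1) <<< nB)) Bn
      else
        PySem.Int.bor (PySem.Int.bor (((2 : Int) ^ nB - 1) <<< (nA + nB)) ((pvA g k) <<< nB)) Bn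

def B (g : Int) (i : Int) : Int := pvBrec g i.toNat

-- ===== PORT B =====
-- one loop iteration of Source B: ab = (a, b) before level k+1, result = (a, b) after it
def pvStep (g : Int) (ab : Int × Int) (k : Nat) : Int × Int :=
  let level := k + 1
  let nA : Nat := 1 <<< level
  let nB : Nat := level <<< (level - 1)
  let gbit := PySem.Int.band g ((1 : Int) <<< level)
  let b' :=
    if gbit ≠ 0 then
      PySem.Int.bor (PySem.Int.bor (ab.2 <<< (nA + nB)) ((((1 : Int) <<< nA) - 1) <<< nB)) ab.2
    else
      PySem.Int.bor (PySem.Int.bor ((((1 : Int) <<< nB) - 1) <<< (nA + nB)) (ab.1 <<< nB)) ab.2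
  let a' :=
    if gbit ≠ 0 then
      PySem.Int.bor (ab.1 <<< nA) ab.1
    else
      PySem.Int.bor ((((1 : Int) <<< nA) - 1) <<< nA) ab.1
  (a', b')

-- for level in range(1, i+1): fold over the levels 1..i (k+1 for k in range(i))
def B_alt (g : Int) (i : Int) : Int :=
  ((List.range i.toNat).foldl (pvStep g)
    ((if PySem.Int.band g 1 ≠ 0 then 0 else 2), (if PySem.Int.band g 1 ≠ 0 then 1 else 0))).2

-- ===== PRECONDITION & SPEC =====
-- Pre_ excludes i < 0, where Python's A raises TypeError (g & 2**i with a float 2**i).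
def Pre_B (g : Int) (i : Int) : Prop := 0 ≤ i
instance (g : Int) (i : Int) : Decidable (Pre_B g i) := by unfold Pre_B; infer_instance
def pvWitness_B : Int × Int := (5, 3)

def Spec_B (g : Int) (i : Int) (out : Int) : Prop := out = B_alt g i
instance (g : Int) (i : Int) (out : Int) : Decidable (Spec_B g i out) := by unfold Spec_B; infer_instance

-- ===== CLAIM (what is proved, stated in full; the proofs are below) =====
def Claim_equal_B : Prop := ∀ (g : Int) (i : Int), Dom_B g i → Pre_B g i → Spec_B g i (B g i)

-- ===== LEMMAS AND PROOFS =====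

-- the loop invariant: after n iterations the pair is (A-line, B-line) at level n
theorem pvFold_eq (g : Int) (n : Nat) :
    (List.range n).foldl (pvStep g)
      ((if PySem.Int.band g 1 ≠ 0 then 0 else 2), (if PySem.Int.band g 1 ≠ 0 then 1 else 0))
      = (pvA g n, pvBrec g n) := by
  induction n with
  | zero => simp [pvA, pvBrec]
  | succ k ih =>
      rw [List.range_succ, List.foldl_append, ih]
      simp only [List.foldl_cons, List.foldl_nil, pvStep, pvA, pvBrec,
        Int.shiftLeft_eq, Nat.shiftLeft_eq, Nat.add_sub_cancel, one_mul]

theorem B_eq_alt (g : Int) (i : Int) : B g i = B_alt g i := by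
  unfold B B_alt
  rw [pvFold_eq]

-- ===== VERDICT (by name: the statement is the Claim_ definition above) =====
theorem B_spec : Claim_equal_B := by
  intro g i _ _
  unfold Spec_B
  exact B_eq_alt g i
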